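-- pv_equiv track=rewrite | github.com/pypi-data/pypi-mirror-46 | packages/pykg2vec/pykg2vec-0.0.42-py3-none-any.whl/pykg2vec/utils/eval_test.py | eval_batch_tail
-- ===== SOURCE A (Python) =====
-- def eval_batch_tail(id_replace_tail, hr_t, e1, r, e2):
--     trank = 0
--     ftrank = 0
--
--     for j in range(len(id_replace_tail)):
--         val = id_replace_tail[-j - 1]
--         if val == e2:
--             break
--         else:
--             trank += 1
--             ftrank += 1
--             if val in hr_t[(e1, r)]:
--                 ftrank -= 1
--     return trank, ftrank
-- ===== SOURCE B (Python) =====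
-- def eval_batch_tail(id_replace_tail, hr_t, e1, r, e2):
--     rev = id_replace_tail[::-1]
--     try:
--         trank = rev.index(e2)
--     except ValueError:
--         trank = len(rev)
--     filtered = sum(1 for x in rev[:trank] if x in hr_t[(e1, r)])
--     return trank, trank - filtered
-- ===== Notes on version B (the rewrite author's own statement) =====
-- stated objective: idiomatic
-- what changed: Replaces the fused reversed index loop (break + increment/decrement bookkeeping) with two separate passes over the reversed list: locate e2 with list.index (try/except), then count filtered entries over the prefix before it.
import Mathlib
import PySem

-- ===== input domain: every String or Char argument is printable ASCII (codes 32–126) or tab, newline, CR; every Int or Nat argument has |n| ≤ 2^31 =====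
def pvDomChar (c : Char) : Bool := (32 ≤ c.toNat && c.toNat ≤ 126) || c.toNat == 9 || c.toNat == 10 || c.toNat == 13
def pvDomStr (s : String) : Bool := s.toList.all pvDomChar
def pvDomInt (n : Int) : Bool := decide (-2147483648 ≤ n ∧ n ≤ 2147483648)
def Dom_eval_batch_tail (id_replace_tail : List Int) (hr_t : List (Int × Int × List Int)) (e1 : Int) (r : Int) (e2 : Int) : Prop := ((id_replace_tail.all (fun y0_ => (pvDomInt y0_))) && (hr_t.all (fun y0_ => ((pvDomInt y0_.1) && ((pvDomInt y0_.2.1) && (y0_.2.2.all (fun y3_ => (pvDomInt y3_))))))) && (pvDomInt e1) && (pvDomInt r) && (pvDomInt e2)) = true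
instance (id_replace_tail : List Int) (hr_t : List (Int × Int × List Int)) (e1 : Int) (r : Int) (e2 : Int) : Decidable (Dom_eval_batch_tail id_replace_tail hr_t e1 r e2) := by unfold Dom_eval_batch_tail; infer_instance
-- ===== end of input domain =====

-- B replaces A's fused reversed scan with two separate passes (find e2, then count
-- filtered entries in the prefix before it); objective: idiomatic, not faster.

-- first-match association-list lookup for hr_t[(e1, r)] (shared dict semantics)
def pvLookup (hr_t : List (Int × Int × List Int)) (e1 r : Int) : Option (List Int) :=
  match hr_t with
  | [] => none
  | (k1, k2, v) :: rest => if k1 = e1 ∧ k2 = r then some v else pvLookup rest e1 r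

-- ===== PORT A =====
-- A's loop: for j in range(len(xs)): val = xs[-j-1]; break on e2, else count.
def evalA_loop (xs : List Int) (hr_t : List (Int × Int × List Int)) (e1 r e2 : Int)
    (js : List Int) (trank ftrank : Int) : Int × Int :=
  match js with
  | [] => (trank, ftrank)
  | j :: rest =>
    match PySem.List.pyGet? xs (-j - 1) with
    | none => (trank, ftrank)  -- unreachable: j ∈ range(len(xs)), so the index is in range
    | some val =>
      if val = e2 then (trank, ftrank)
      else
        let trank := trank + 1
        let ftrank := ftrank + 1
        match pvLookup hr_t e1 r with
        | none => (trank, ftrank)  -- Python raises KeyError here; excluded by Pre_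
        | some ids =>
          evalA_loop xs hr_t e1 r e2 rest trank (if val ∈ ids then ftrank - 1 else ftrank)

def eval_batch_tail (id_replace_tail : List Int) (hr_t : List (Int × Int × List Int)) (e1 : Int) (r : Int) (e2 : Int) : Int × Int :=
  evalA_loop id_replace_tail hr_t e1 r e2 (PySem.List.pyRange 0 (id_replace_tail.length : Int) 1) 0 0

-- ===== PORT B =====
def eval_batch_tail_alt (id_replace_tail : List Int) (hr_t : List (Int × Int × List Int)) (e1 : Int) (r : Int) (e2 : Int) : Int × Int :=
  let rev := id_replace_tail.reverse
  let trank : Nat := (PySem.List.index? rev e2).getD rev.length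
  -- membership test is evaluated per element of the prefix, as in Source B's generator
  let filtered : Nat := ((rev.take trank).filter (fun x =>
      match pvLookup hr_t e1 r with
      | some ids => decide (x ∈ ids)
      | none => false)).length
  ((trank : Int), (trank : Int) - (filtered : Int))

-- ===== PRECONDITION & SPEC =====
-- Pre_ excludes exactly the inputs where A (and B alike) raises KeyError:
-- (e1, r) absent from hr_t while the scan inspects at least one non-e2 element.
def Pre_eval_batch_tail (id_replace_tail : List Int) (hr_t : List (Int × Int × List Int)) (e1 : Int) (r : Int) (e2 : Int) : Prop :=
  (pvLookup hr_t e1 r).isSome = true ∨ id_replace_tail = [] ∨ id_replace_tail.getLast? = some e2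
instance (id_replace_tail : List Int) (hr_t : List (Int × Int × List Int)) (e1 : Int) (r : Int) (e2 : Int) : Decidable (Pre_eval_batch_tail id_replace_tail hr_t e1 r e2) := by unfold Pre_eval_batch_tail; infer_instance

def pvWitness_eval_batch_tail : List Int × (List (Int × Int × List Int)) × Int × Int × Int :=
  ([3, 1, 2], [(0, 1, [3, 5])], 0, 1, 2)

def Spec_eval_batch_tail (id_replace_tail : List Int) (hr_t : List (Int × Int × List Int)) (e1 : Int) (r : Int) (e2 : Int) (out : Int × Int) : Prop := out = eval_batch_tail_alt id_replace_tail hr_t e1 r e2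
instance (id_replace_tail : List Int) (hr_t : List (Int × Int × List Int)) (e1 : Int) (r : Int) (e2 : Int) (out : Int × Int) : Decidable (Spec_eval_batch_tail id_replace_tail hr_t e1 r e2 out) := by unfold Spec_eval_batch_tail; infer_instance

-- ===== CLAIM (what is proved, stated in full; the proofs are below) =====
def Claim_equal_eval_batch_tail : Prop := ∀ (id_replace_tail : List Int) (hr_t : List (Int × Int × List Int)) (e1 : Int) (r : Int) (e2 : Int), Dom_eval_batch_tail id_replace_tail hr_t e1 r e2 → Pre_eval_batch_tail id_replace_tail hr_t e1 r e2 → Spec_eval_batch_tail id_replace_tail hr_t e1 r e2 (eval_batch_tail id_replace_tail hr_t e1 r e2)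

-- ===== LEMMAS AND PROOFS =====

-- A's loop expressed as a direct scan of the reversed list (proof-only helper)
def scanA (hr_t : List (Int × Int × List Int)) (e1 r e2 : Int) :
    List Int → Int → Int → Int × Int
  | [], t, f => (t, f)
  | v :: l, t, f =>
    if v = e2 then (t, f)
    else
      match pvLookup hr_t e1 r with
      | none => (t + 1, f + 1)
      | some ids => scanA hr_t e1 r e2 l (t + 1) (if v ∈ ids then f else f + 1)

-- B's two quantities as functions of the (reversed) list
def trB (e2 : Int) (l : List Int) : Nat := (PySem.List.index? l e2).getD l.length
def filB (ids : List Int) (e2 : Int) (l : List Int) : Nat :=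
  ((l.take (trB e2 l)).filter (fun x => decide (x ∈ ids))).length

lemma evalA_loop_eq_scanA (xs : List Int) (hr_t : List (Int × Int × List Int))
    (e1 r e2 : Int) :
    ∀ (m k : Nat), k + m = xs.length → ∀ t f,
      evalA_loop xs hr_t e1 r e2 (PySem.List.pyRange (k : Int) (xs.length : Int) 1) t f
        = scanA hr_t e1 r e2 (xs.reverse.drop k) t f := by
  intro m
  induction m with
  | zero =>
    intro k hk t f
    have h1 : PySem.List.pyRange (k : Int) (xs.length : Int) 1 = [] := by
      apply PySem.List.pyRange_one_eq_nil; omega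
    have h2 : xs.reverse.drop k = [] := by
      apply List.drop_eq_nil_of_le; simp; omega
    rw [h1, h2]; rfl
  | succ m ih =>
    intro k hk t f
    have hklt : k < xs.length := by omega
    have h1 : PySem.List.pyRange (k : Int) (xs.length : Int) 1
        = (k : Int) :: PySem.List.pyRange ((k : Int) + 1) (xs.length : Int) 1 := by
      apply PySem.List.pyRange_one_cons; exact_mod_cast hklt
    have hidx : -(k : Int) - 1 = -((k + 1 : Nat) : Int) := by push_cast; ring
    have hget : PySem.List.pyGet? xs (-(k : Int) - 1) = xs[xs.length - (k + 1)]? := by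
      rw [hidx, PySem.List.pyGet?_neg_natCast] <;> omega
    have hkr : k < xs.reverse.length := by simpa using hklt
    have hdrop : xs.reverse.drop k = xs.reverse[k] :: xs.reverse.drop (k + 1) :=
      List.drop_eq_getElem_cons hkr
    have hrev : xs.reverse[k] = xs[xs.length - 1 - k] := List.getElem_reverse hkr
    have hsome : PySem.List.pyGet? xs (-(k : Int) - 1) = some xs.reverse[k] := by
      rw [hget, hrev]
      have : xs.length - (k + 1) = xs.length - 1 - k := by omega
      rw [this, List.getElem?_eq_getElem]
    rw [h1, hdrop]
    show evalA_loop xs hr_t e1 r e2 ((k : Int) :: _) t f = _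
    rw [evalA_loop, hsome]
    simp only []
    by_cases hv : xs.reverse[k] = e2
    · rw [scanA]; simp [hv]
    · rw [scanA]; simp only [hv, if_false]
      cases hvl : pvLookup hr_t e1 r with
      | none => rfl
      | some ids =>
        dsimp only
        have hcast : ((k : Int) + 1) = ((k + 1 : Nat) : Int) := by push_cast; ring
        rw [hcast, ih (k + 1) (by omega)]
        simp

lemma trB_cons_ne (e2 v : Int) (l : List Int) (h : v ≠ e2) :
    trB e2 (v :: l) = trB e2 l + 1 := by
  unfold trB
  simp only [PySem.List.index?_eq_idxOf?, List.idxOf?_cons,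
    show (v == e2) = false by simpa using h]
  cases hi : List.idxOf? e2 l <;> simp [hi]

lemma filB_cons_ne (ids : List Int) (e2 v : Int) (l : List Int) (h : v ≠ e2) :
    filB ids e2 (v :: l) = filB ids e2 l + (if v ∈ ids then 1 else 0) := by
  unfold filB
  rw [trB_cons_ne e2 v l h]
  rw [List.take_succ_cons]
  by_cases hm : v ∈ ids <;> simp [hm]

lemma scanA_closed (hr_t : List (Int × Int × List Int)) (e1 r e2 : Int)
    (ids : List Int) (hids : pvLookup hr_t e1 r = some ids) :
    ∀ (l : List Int) (t f : Int),
      scanA hr_t e1 r e2 l t f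
        = (t + (trB e2 l : Int), f + (trB e2 l : Int) - (filB ids e2 l : Int)) := by
  intro l
  induction l with
  | nil => intro t f; simp [scanA, trB, filB, PySem.List.index?]
  | cons v l ih =>
    intro t f
    rw [scanA]
    by_cases hv : v = e2
    · have h0 : trB e2 (e2 :: l) = 0 := by
        simp [trB, PySem.List.index?_eq_idxOf?, List.idxOf?_cons]
      simp [hv, h0, filB]
    · simp only [hv, if_false, hids]
      rw [ih]
      have htr := trB_cons_ne e2 v l hv
      have hfl := filB_cons_ne ids e2 v l hv
      rw [htr, hfl]
      have hfil_le : filB ids e2 l ≤ trB e2 l := by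
        unfold filB
        calc ((l.take (trB e2 l)).filter _).length ≤ (l.take (trB e2 l)).length :=
              List.length_filter_le _ _
          _ ≤ trB e2 l := by simp
      refine Prod.ext ?_ ?_ <;>
        by_cases hm : v ∈ ids <;>
          simp only [ih, hm, if_true, if_false, htr, hfl] <;> push_cast <;> ring

lemma alt_unfold (xs : List Int) (hr_t : List (Int × Int × List Int)) (e1 r e2 : Int)
    (ids : List Int) (hids : pvLookup hr_t e1 r = some ids) :
    eval_batch_tail_alt xs hr_t e1 r e2
      = ((trB e2 xs.reverse : Int),
         (trB e2 xs.reverse : Int) - (filB ids e2 xs.reverse : Int)) := by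
  unfold eval_batch_tail_alt trB filB
  rw [hids]
  rfl

-- ===== VERDICT (by name: the statement is the Claim_ definition above) =====
theorem eval_batch_tail_spec : Claim_equal_eval_batch_tail := by
  intro xs hr_t e1 r e2 _dom hpre
  unfold Spec_eval_batch_tail
  unfold eval_batch_tail
  rw [show (0 : Int) = ((0 : Nat) : Int) by rfl,
      evalA_loop_eq_scanA xs hr_t e1 r e2 xs.length 0 (by omega)]
  simp only [List.drop_zero]
  cases hvl : pvLookup hr_t e1 r with
  | some ids =>
    rw [scanA_closed hr_t e1 r e2 ids hvl, alt_unfold xs hr_t e1 r e2 ids hvl]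
    simp
  | none =>
    -- Pre_ forces the scan to stop immediately: xs empty or last element = e2
    unfold Pre_eval_batch_tail at hpre
    rcases hpre with h | h | h
    · rw [hvl] at h; simp at h
    · subst h; rfl
    · obtain ⟨l', hrev⟩ : ∃ l', xs.reverse = e2 :: l' := by
        cases hx : xs.reverse with
        | nil => simp at hx; subst hx; simp at h
        | cons a l' =>
          have : xs.getLast? = some a := by
            rw [← List.head?_reverse, hx]; rfl
          rw [this] at h; injection h with h'; subst h'; exact ⟨l', rfl⟩
      rw [hrev, scanA, if_pos rfl]
      unfold eval_batch_tail_alt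
      rw [hrev]
      simp [PySem.List.index?_eq_idxOf?, List.idxOf?_cons]
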